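-- pv_equiv track=rewrite | github.com/mharty3/advent_of_code | 2023/day12.py | count_possibilities
-- ===== SOURCE A (Python) =====
-- from itertools import product
--
-- def find_contiguous_blocks(config):
--     blocks = []
--     count = 0
--     for val in config:
--         if val == '.':
--             if count != 0:
--                 blocks.append(count)
--             count = 0
--         if val == '#':
--             count += 1
--     if count:
--         blocks.append(count)
--     return blocks
--
-- def count_possibilities(config, blocks):
--     c = '?'
--     q_idx = [pos for pos, char in enumerate(config) if char == c]
--
--     l = product(['.', '#'], repeat=len(q_idx))
--
--     count = 0
--     for option in l:
--         filled_config = config.copy()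
--         for val, idx in zip(option, q_idx):
--             filled_config[idx] = val
--         if find_contiguous_blocks(filled_config) == blocks:
--             count += 1
--     return count
-- ===== SOURCE B (Python) =====
-- def count_possibilities(config, blocks):
--     # DP over positions; state = (current run length, number of blocks already matched)
--     states = {(0, 0): 1}
--     for s in config:
--         nxt = {}
--         for (run, j), cnt in states.items():
--             for ch in (('.', '#') if s == '?' else (s,)):
--                 if ch == '.':
--                     if run == 0:
--                         key = (0, j)
--                     elif j < len(blocks) and blocks[j] == run:
--                         key = (0, j + 1)
--                     else:
--                         continue
--                 elif ch == '#':
--                     key = (run + 1, j)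
--                 else:
--                     key = (run, j)
--                 nxt[key] = nxt.get(key, 0) + cnt
--         states = nxt
--     total = 0
--     for (run, j), cnt in states.items():
--         if run == 0:
--             if j == len(blocks):
--                 total += cnt
--         elif j == len(blocks) - 1 and blocks[j] == run:
--             total += cnt
--     return total
-- ===== Notes on version B (the rewrite author's own statement) =====
-- stated objective: alternative
-- what changed: A enumerates all 2^k fillings of the '?' positions (itertools.product) and rescans each filled configuration; B makes a single left-to-right dynamic-programming pass whose states are (current run length, blocks already matched) with counts merged in a dictionary, so no filling is ever materialised.
import Mathlib
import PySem

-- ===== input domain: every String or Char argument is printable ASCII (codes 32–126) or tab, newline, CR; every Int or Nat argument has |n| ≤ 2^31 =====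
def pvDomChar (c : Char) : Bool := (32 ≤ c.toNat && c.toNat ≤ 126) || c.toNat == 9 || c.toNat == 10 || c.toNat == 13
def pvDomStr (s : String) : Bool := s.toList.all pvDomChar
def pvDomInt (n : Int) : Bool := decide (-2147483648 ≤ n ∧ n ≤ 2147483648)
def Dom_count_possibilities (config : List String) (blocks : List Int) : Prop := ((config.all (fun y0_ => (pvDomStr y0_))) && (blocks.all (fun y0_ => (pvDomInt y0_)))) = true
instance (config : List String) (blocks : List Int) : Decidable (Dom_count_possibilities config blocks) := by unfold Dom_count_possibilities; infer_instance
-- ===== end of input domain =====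

-- B replaces A's 2^k enumeration of all '?' fillings by a left-to-right dynamic
-- programming over states (current run length, blocks matched); equivalence of the
-- RETURN values is proved (A mutates only its private copies, no observable side effects).

-- ===== PORT A =====
-- find_contiguous_blocks
def pvFcb (config : List String) : List Int :=
  let p := config.foldl (fun (st : List Int × Int) val =>
      let st1 := if val = "." then (if st.2 ≠ 0 then (st.1 ++ [st.2], (0 : Int)) else (st.1, 0)) else st
      if val = "#" then (st1.1, st1.2 + 1) else st1) ([], 0)
  if p.2 ≠ 0 then p.1 ++ [p.2] else p.1

-- itertools.product(['.','#'], repeat=n), in itertools order (rightmost varies fastest)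
def pvProduct (l : List String) : Nat → List (List String)
  | 0 => [[]]
  | n + 1 => l.flatMap (fun x => (pvProduct l n).map (fun r => x :: r))

def count_possibilities (config : List String) (blocks : List Int) : Int :=
  let q_idx := ((PySem.List.enumerate config).filter (fun pc => pc.2 = "?")).map (·.1)
  let l := pvProduct ["." , "#"] q_idx.length
  l.foldl (fun count option =>
    let filled := (option.zip q_idx).foldl (fun fc vi => PySem.List.pySetD fc vi.2 vi.1) config
    if pvFcb filled = blocks then count + 1 else count) 0

-- ===== PORT B =====
-- one position of the DP: push every live state (run, j) through character s
def pvStep (blocks : List Int) (s : String) (states : PySem.Dict (Int × Int) Int) :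
    PySem.Dict (Int × Int) Int :=
  states.items.foldl (fun nxt (p : (Int × Int) × Int) =>
    (if s = "?" then ["." , "#"] else [s]).foldl (fun nxt ch =>
      let key? : Option (Int × Int) :=
        if ch = "." then
          if p.1.1 = 0 then some (0, p.1.2)
          else if p.1.2 < (blocks.length : Int) ∧ PySem.List.pyGet? blocks p.1.2 = some p.1.1 then
            some (0, p.1.2 + 1)
          else none
        else if ch = "#" then some (p.1.1 + 1, p.1.2)
        else some (p.1.1, p.1.2)
      match key? with
      | none => nxt
      | some key => nxt.insert key (nxt.getD key 0 + p.2)) nxt) PySem.Dict.empty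

def count_possibilities_alt (config : List String) (blocks : List Int) : Int :=
  let final := config.foldl (fun states s => pvStep blocks s states)
      (PySem.Dict.empty.insert ((0 : Int), (0 : Int)) 1)
  final.items.foldl (fun total p =>
    if p.1.1 = 0 then (if p.1.2 = (blocks.length : Int) then total + p.2 else total)
    else if p.1.2 = (blocks.length : Int) - 1 ∧ PySem.List.pyGet? blocks p.1.2 = some p.1.1 then
      total + p.2
    else total) 0

-- ===== PRECONDITION & SPEC =====
def Spec_count_possibilities (config : List String) (blocks : List Int) (out : Int) : Prop := out = count_possibilities_alt config blocks
instance (config : List String) (blocks : List Int) (out : Int) : Decidable (Spec_count_possibilities config blocks out) := by unfold Spec_count_possibilities; infer_instance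

-- ===== CLAIM (what is proved, stated in full; the proofs are below) =====
def Claim_equal_count_possibilities : Prop := ∀ (config : List String) (blocks : List Int), Dom_count_possibilities config blocks → Spec_count_possibilities config blocks (count_possibilities config blocks)

-- ===== LEMMAS AND PROOFS =====

-- the block scan of find_contiguous_blocks, as a structural recursion with a running count
def scanFrom : List String → Int → List Int
  | [], run => if run ≠ 0 then [run] else []
  | s :: cs, run =>
    if s = "." then (if run ≠ 0 then run :: scanFrom cs 0 else scanFrom cs 0)
    else if s = "#" then scanFrom cs (run + 1)
    else scanFrom cs run

-- fill the '?' positions of config with successive elements of opts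
def fillQ : List String → List String → List String
  | [], _ => []
  | s :: cs, opts => if s = "?" then opts.headD "?" :: fillQ cs opts.tail else s :: fillQ cs opts

def numQ (config : List String) : Nat := (config.filter (fun s => s = "?")).length

-- reference recursion: number of fillings of config, scanning from run, matching the suffix rem
def gRef : List String → Int → List Int → Int
  | [], run, rem => if run = 0 then (if rem = [] then 1 else 0) else (if rem = [run] then 1 else 0)
  | s :: cs, run, rem =>
    if s = "?" then
      (if run = 0 then gRef cs 0 rem
       else match rem with | [] => 0 | b :: bs => if b = run then gRef cs 0 bs else 0)
      + gRef cs (run + 1) rem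
    else if s = "." then
      (if run = 0 then gRef cs 0 rem
       else match rem with | [] => 0 | b :: bs => if b = run then gRef cs 0 bs else 0)
    else if s = "#" then gRef cs (run + 1) rem
    else gRef cs run rem

-- ---- A side ----

def fcbStep (st : List Int × Int) (val : String) : List Int × Int :=
  let st1 := if val = "." then (if st.2 ≠ 0 then (st.1 ++ [st.2], (0 : Int)) else (st.1, 0)) else st
  if val = "#" then (st1.1, st1.2 + 1) else st1

lemma fcbStep_eq : (fun (st : List Int × Int) (val : String) =>
    let st1 := if val = "." then (if st.2 ≠ 0 then (st.1 ++ [st.2], (0 : Int)) else (st.1, 0)) else st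
    if val = "#" then (st1.1, st1.2 + 1) else st1) = fcbStep := rfl

lemma fcb_foldl (xs : List String) (bs : List Int) (run : Int) :
    (let p := xs.foldl fcbStep (bs, run)
      if p.2 ≠ 0 then p.1 ++ [p.2] else p.1) = bs ++ scanFrom xs run := by
  induction xs generalizing bs run with
  | nil =>
    by_cases h : run = 0 <;> simp [scanFrom, h]
  | cons s cs ih =>
    simp only [List.foldl_cons]
    by_cases hd : s = "."
    · have hh : s ≠ "#" := by simp [hd]
      by_cases hr : run = 0
      · have h1 : fcbStep (bs, run) s = (bs, 0) := by simp [fcbStep, hd, hh, hr]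
        rw [h1, ih]
        simp [scanFrom, hd, hr]
      · have h1 : fcbStep (bs, run) s = (bs ++ [run], 0) := by simp [fcbStep, hd, hh, hr]
        rw [h1, ih]
        simp [scanFrom, hd, hr]
    · by_cases hh : s = "#"
      · have h1 : fcbStep (bs, run) s = (bs, run + 1) := by simp [fcbStep, hd, hh]
        rw [h1, ih]
        simp [scanFrom, hd, hh]
      · have h1 : fcbStep (bs, run) s = (bs, run) := by simp [fcbStep, hd, hh]
        rw [h1, ih]
        simp [scanFrom, hd, hh]

lemma fcb_eq_scanFrom (xs : List String) : pvFcb xs = scanFrom xs 0 := by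
  show (let p := xs.foldl _ ([], 0); if p.2 ≠ 0 then p.1 ++ [p.2] else p.1) = _
  rw [fcbStep_eq]
  simpa using fcb_foldl xs [] 0

lemma product_length {l : List String} {n : Nat} {opt : List String}
    (h : opt ∈ pvProduct l n) : opt.length = n := by
  induction n generalizing opt with
  | zero => simp [pvProduct] at h; simp [h]
  | succ n ih =>
    simp only [pvProduct, List.mem_flatMap, List.mem_map] at h
    obtain ⟨x, -, r, hr, rfl⟩ := h
    simp [ih hr]

def qIdx (config : List String) : List Int :=
  ((PySem.List.enumerate config).filter (fun pc => pc.2 = "?")).map (·.1)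

lemma enum_shift (xs : List String) : ∀ s : Int,
    PySem.List.enumerate xs (s + 1) = (PySem.List.enumerate xs s).map (fun p => (p.1 + 1, p.2)) := by
  induction xs with
  | nil => intro s; simp [PySem.List.enumerate_nil]
  | cons x xs ih =>
    intro s
    rw [PySem.List.enumerate_cons, PySem.List.enumerate_cons, List.map_cons, ih (s + 1)]

lemma qIdx_cons (s : String) (cs : List String) :
    qIdx (s :: cs) = (if s = "?" then [(0 : Int)] else []) ++ (qIdx cs).map (· + 1) := by
  unfold qIdx
  rw [PySem.List.enumerate_cons]
  rw [show (0 : Int) + 1 = 0 + 1 from rfl, enum_shift cs 0]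
  by_cases h : s = "?" <;>
    simp [h, List.filter_map, List.map_map, Function.comp_def]

lemma qIdx_nonneg (config : List String) : ∀ i ∈ qIdx config, 0 ≤ i := by
  induction config with
  | nil => simp [qIdx, PySem.List.enumerate_nil]
  | cons s cs ih =>
    intro i hi
    rw [qIdx_cons] at hi
    rcases List.mem_append.1 hi with h | h
    · split at h <;> simp_all
    · obtain ⟨j, hj, rfl⟩ := List.mem_map.1 h
      have := ih j hj; omega

lemma qIdx_length (config : List String) : (qIdx config).length = numQ config := by
  induction config with
  | nil => simp [qIdx, numQ, PySem.List.enumerate_nil]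
  | cons s cs ih =>
    rw [qIdx_cons]
    by_cases h : s = "?" <;> simp [h, numQ, List.filter_cons] at ih ⊢ <;> omega

lemma foldl_set_cons (opt : List String) : ∀ (idxs : List Int), (∀ i ∈ idxs, 0 ≤ i) →
    ∀ (a : String) (fc : List String),
    (opt.zip (idxs.map (· + 1))).foldl (fun fc vi => PySem.List.pySetD fc vi.2 vi.1) (a :: fc)
      = a :: (opt.zip idxs).foldl (fun fc vi => PySem.List.pySetD fc vi.2 vi.1) fc := by
  induction opt with
  | nil => intro idxs _ a fc; simp
  | cons v vs ih =>
    intro idxs hnn a fc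
    cases idxs with
    | nil => simp
    | cons i is =>
      have hi : 0 ≤ i := hnn i (by simp)
      have hset : PySem.List.pySetD (a :: fc) (i + 1) v = a :: PySem.List.pySetD fc i v := by
        rw [PySem.List.pySetD_of_nonneg (a :: fc) v (by omega), PySem.List.pySetD_of_nonneg fc v hi]
        have : (i + 1).toNat = i.toNat + 1 := by omega
        rw [this, List.set_cons_succ]
      simp only [List.map_cons, List.zip_cons_cons, List.foldl_cons, hset]
      exact ih is (fun j hj => hnn j (by simp [hj])) a _

lemma fill_eq_fillQ : ∀ (config opt : List String), opt.length = numQ config →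
    (opt.zip (qIdx config)).foldl (fun fc vi => PySem.List.pySetD fc vi.2 vi.1) config
      = fillQ config opt := by
  intro config
  induction config with
  | nil => intro opt _; simp [qIdx, PySem.List.enumerate_nil, fillQ]
  | cons s cs ih =>
    intro opt hlen
    rw [qIdx_cons]
    by_cases h : s = "?"
    · subst h
      have hq : numQ ("?" :: cs) = numQ cs + 1 := by simp [numQ, List.filter_cons]
      cases opt with
      | nil => rw [hq] at hlen; simp at hlen
      | cons v vs =>
        have hvs : vs.length = numQ cs := by rw [hq] at hlen; simpa using hlen
        simp only [if_true, List.singleton_append, List.zip_cons_cons, List.foldl_cons]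
        have h0 : PySem.List.pySetD ("?" :: cs) 0 v = v :: cs := by
          rw [PySem.List.pySetD_of_nonneg ("?" :: cs) v (by omega)]; rfl
        rw [h0, foldl_set_cons vs (qIdx cs) (qIdx_nonneg cs) v cs, ih vs hvs]
        simp [fillQ]
    · have hq : numQ (s :: cs) = numQ cs := by simp [numQ, List.filter_cons, h]
      simp only [h, if_false, List.nil_append]
      rw [foldl_set_cons opt (qIdx cs) (qIdx_nonneg cs) s cs, ih opt (by omega)]
      simp [fillQ, h]

lemma main_count : ∀ (config : List String) (run : Int) (rem : List Int),
    ((pvProduct ["." , "#"] (numQ config)).countP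
      (fun opt => decide (scanFrom (fillQ config opt) run = rem)) : Int) = gRef config run rem := by
  intro config
  induction config with
  | nil =>
    intro run rem
    by_cases hr : run = 0
    · by_cases he : rem = [] <;> simp [pvProduct, numQ, fillQ, scanFrom, gRef, hr, he]
    · by_cases he : rem = [run]
      · simp [pvProduct, numQ, fillQ, scanFrom, gRef, hr, he]
      · simp [pvProduct, numQ, fillQ, scanFrom, gRef, hr, he, eq_comm]
  | cons s cs ih =>
    intro run rem
    have dotEq : ((pvProduct ["." , "#"] (numQ cs)).countP
        (fun opt => decide (scanFrom ("." :: fillQ cs opt) run = rem)) : Int)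
        = (if run = 0 then gRef cs 0 rem
           else match rem with | [] => 0 | b :: bs => if b = run then gRef cs 0 bs else 0) := by
      by_cases hr : run = 0
      · simpa [scanFrom, hr] using ih 0 rem
      · cases rem with
        | nil =>
          have hz : ∀ opt ∈ pvProduct ["." , "#"] (numQ cs),
              (decide (scanFrom ("." :: fillQ cs opt) run = ([] : List Int))) = false := by
            intro opt _; simp [scanFrom, hr]
          rw [List.countP_eq_zero.2 (by simpa using hz)]
          simp [hr]
        | cons b bs =>
          by_cases hb : b = run
          · have hc : ∀ opt ∈ pvProduct ["." , "#"] (numQ cs),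
                (decide (scanFrom ("." :: fillQ cs opt) run = b :: bs)) = true ↔
                  (decide (scanFrom (fillQ cs opt) 0 = bs)) = true := by
              intro opt _; simp [scanFrom, hr, hb]
            rw [List.countP_congr hc]
            simpa [hr, hb] using ih 0 bs
          · have hz : ∀ opt ∈ pvProduct ["." , "#"] (numQ cs),
                (decide (scanFrom ("." :: fillQ cs opt) run = b :: bs)) = false := by
              intro opt _
              simp [scanFrom, hr]
              intro h; omega
            rw [List.countP_eq_zero.2 (by simpa using hz)]
            simp [hr, hb]
    have hashEq : ((pvProduct ["." , "#"] (numQ cs)).countP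
        (fun opt => decide (scanFrom ("#" :: fillQ cs opt) run = rem)) : Int)
        = gRef cs (run + 1) rem := by
      simpa [scanFrom] using ih (run + 1) rem
    by_cases hs : s = "?"
    · subst hs
      have hn : numQ ("?" :: cs) = numQ cs + 1 := by simp [numQ, List.filter_cons]
      rw [hn]
      simp only [pvProduct, List.flatMap_cons, List.flatMap_nil, List.append_nil,
        List.countP_append, List.countP_map, gRef]
      have hf : ∀ (x : String) (opt : List String),
          fillQ ("?" :: cs) (x :: opt) = x :: fillQ cs opt := by
        intro x opt; simp [fillQ]
      push_cast
      rw [show ((fun opt => decide (scanFrom (fillQ ("?" :: cs) opt) run = rem)) ∘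
            (fun r => "." :: r)) = (fun opt => decide (scanFrom ("." :: fillQ cs opt) run = rem))
          from by funext opt; simp [hf]]
      rw [show ((fun opt => decide (scanFrom (fillQ ("?" :: cs) opt) run = rem)) ∘
            (fun r => "#" :: r)) = (fun opt => decide (scanFrom ("#" :: fillQ cs opt) run = rem))
          from by funext opt; simp [hf]]
      rw [dotEq, hashEq]
    · have hn : numQ (s :: cs) = numQ cs := by simp [numQ, List.filter_cons, hs]
      have hf : ∀ opt, fillQ (s :: cs) opt = s :: fillQ cs opt := by
        intro opt; simp [fillQ, hs]
      rw [hn]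
      simp only [hf]
      by_cases hd : s = "."
      · subst hd; rw [dotEq]; simp [gRef, hs]
      · by_cases hh : s = "#"
        · subst hh; rw [hashEq]; simp [gRef, hs, hd]
        · have : ∀ opt, scanFrom (s :: fillQ cs opt) run = scanFrom (fillQ cs opt) run := by
            intro opt; simp [scanFrom, hd, hh]
          simp only [this]
          rw [ih run rem]
          simp [gRef, hs, hd, hh]

lemma A_eq_gRef (config : List String) (blocks : List Int) :
    count_possibilities config blocks = gRef config 0 blocks := by
  unfold count_possibilities
  show (pvProduct ["." , "#"] (qIdx config).length).foldl
      (fun count option => if pvFcb ((option.zip (qIdx config)).foldl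
          (fun fc vi => PySem.List.pySetD fc vi.2 vi.1) config) = blocks
        then count + 1 else count) 0 = gRef config 0 blocks
  rw [show (fun (count : Int) (option : List String) =>
        if pvFcb ((option.zip (qIdx config)).foldl
            (fun fc vi => PySem.List.pySetD fc vi.2 vi.1) config) = blocks
        then count + 1 else count)
      = (fun (count : Int) (option : List String) =>
        if (fun option => pvFcb ((option.zip (qIdx config)).foldl
            (fun fc vi => PySem.List.pySetD fc vi.2 vi.1) config) = blocks) option
        then count + 1 else count) from rfl]
  rw [PySem.List.foldl_ite_add_one]
  rw [qIdx_length]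
  rw [List.countP_congr (q := fun opt => decide (scanFrom (fillQ config opt) 0 = blocks))
    (fun opt hopt => by
      rw [fill_eq_fillQ config opt (product_length hopt), fcb_eq_scanFrom])]
  rw [main_count config 0 blocks]
  ring

-- ---- B side ----

def KeysOk (blocks : List Int) (ks : List (Int × Int)) : Prop :=
  ∀ p ∈ ks, 0 ≤ p.2 ∧ p.2 ≤ (blocks.length : Int)

-- the two lambdas of pvStep, named for the proofs
def inF (blocks : List Int) (p : (Int × Int) × Int)
    (nxt : PySem.Dict (Int × Int) Int) (ch : String) : PySem.Dict (Int × Int) Int :=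
  let key? : Option (Int × Int) :=
    if ch = "." then
      if p.1.1 = 0 then some (0, p.1.2)
      else if p.1.2 < (blocks.length : Int) ∧ PySem.List.pyGet? blocks p.1.2 = some p.1.1 then
        some (0, p.1.2 + 1)
      else none
    else if ch = "#" then some (p.1.1 + 1, p.1.2)
    else some (p.1.1, p.1.2)
  match key? with
  | none => nxt
  | some key => nxt.insert key (nxt.getD key 0 + p.2)

def outF (blocks : List Int) (s : String)
    (nxt : PySem.Dict (Int × Int) Int) (p : (Int × Int) × Int) : PySem.Dict (Int × Int) Int :=
  (if s = "?" then ["." , "#"] else [s]).foldl (inF blocks p) nxt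

lemma pvStep_eq (blocks : List Int) (s : String) (states : PySem.Dict (Int × Int) Int) :
    pvStep blocks s states = states.items.foldl (outF blocks s) PySem.Dict.empty := rfl

-- per-character contribution of one live state
def contrib (blocks : List Int) (rest : List String) (run j : Int) (ch : String) : Int :=
  if ch = "." then
    (if run = 0 then gRef rest 0 (blocks.drop j.toNat)
     else match blocks.drop j.toNat with | [] => 0 | b :: bs => if b = run then gRef rest 0 bs else 0)
  else if ch = "#" then gRef rest (run + 1) (blocks.drop j.toNat)
  else gRef rest run (blocks.drop j.toNat)

lemma gRef_cons_contrib (blocks : List Int) (rest : List String) (s : String) (run j : Int) :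
    gRef (s :: rest) run (blocks.drop j.toNat)
      = if s = "?" then contrib blocks rest run j "." + contrib blocks rest run j "#"
        else contrib blocks rest run j s := by
  by_cases hq : s = "?"
  · simp [gRef, contrib, hq]
  · by_cases hd : s = "."
    · simp [gRef, contrib, hq, hd]
    · by_cases hh : s = "#"
      · simp [gRef, contrib, hq, hd, hh]
      · simp [gRef, contrib, hq, hd, hh]

lemma sum_map_overwrite (g : (Int × Int) → Int) :
    ∀ (l : List ((Int × Int) × Int)) (k : Int × Int) (v0 c : Int),
      (l.map Prod.fst).Nodup → (k, v0) ∈ l →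
      ((l.map (fun p => if p.1 == k then (k, v0 + c) else p)).map (fun p => p.2 * g p.1)).sum
        = (l.map (fun p => p.2 * g p.1)).sum + c * g k := by
  intro l
  induction l with
  | nil => intro k v0 c _ hm; simp at hm
  | cons h t ih =>
    intro k v0 c hnd hm
    simp only [List.map_cons, List.nodup_cons] at hnd
    rcases List.mem_cons.1 hm with rfl | hmt
    · have ht : t.map (fun p => if p.1 == k then (k, v0 + c) else p) = t := by
        apply (List.map_congr_left ?_).trans (List.map_id t)
        intro p hp
        have hne : p.1 ≠ k := by
          intro he
          have hmm : p.1 ∈ t.map Prod.fst := List.mem_map_of_mem (f := Prod.fst) hp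
          rw [he] at hmm
          exact hnd.1 hmm
        simp [hne]
      simp only [List.map_cons, BEq.rfl, if_true, ht, List.sum_cons]
      ring
    · have hk : (k : Int × Int) ∈ t.map Prod.fst := by
        simpa using List.mem_map_of_mem (f := Prod.fst) hmt
      have hne : h.1 ≠ k := fun h' => hnd.1 (h' ▸ hk)
      have hbe : ¬((h.1 == k) = true) := by simpa using hne
      simp only [List.map_cons, if_neg hbe, List.sum_cons, ih k v0 c hnd.2 hmt]
      ring

def WItems (blocks : List Int) (rest : List String) (l : List ((Int × Int) × Int)) : Int :=
  (l.map (fun p => p.2 * gRef rest p.1.1 (blocks.drop p.1.2.toNat))).sum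

lemma bump_sum (blocks : List Int) (rest : List String) (nxt : PySem.Dict (Int × Int) Int)
    (k : Int × Int) (c : Int) (hnd : nxt.keys.Nodup) :
    WItems blocks rest ((nxt.insert k (nxt.getD k 0 + c)).items)
      = WItems blocks rest nxt.items + c * gRef rest k.1 (blocks.drop k.2.toNat) := by
  by_cases hc : nxt.contains k = true
  · have hsome : ∃ v0, nxt.get? k = some v0 := by
      rw [PySem.Dict.contains_eq_isSome_get?] at hc
      exact Option.isSome_iff_exists.1 hc
    obtain ⟨v0, hv0⟩ := hsome
    have hgd : nxt.getD k 0 = v0 := PySem.Dict.getD_of_get?_eq_some nxt 0 hv0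
    have hmem : (k, v0) ∈ nxt.items := PySem.Dict.mem_items_of_get?_eq_some nxt hv0
    rw [PySem.Dict.items_insert_of_contains nxt _ hc, hgd]
    unfold WItems
    exact sum_map_overwrite (fun q => gRef rest q.1 (blocks.drop q.2.toNat))
      nxt.items k v0 c hnd hmem
  · rw [PySem.Dict.items_insert_of_not_contains nxt _ (by simpa using hc),
      PySem.Dict.getD_of_not_contains nxt 0 (by simpa using hc)]
    unfold WItems
    simp [List.sum_append]

lemma insert_step (blocks : List Int) (rest : List String) (nxt : PySem.Dict (Int × Int) Int)
    (k : Int × Int) (c : Int) (hnd : nxt.keys.Nodup) (hok : KeysOk blocks nxt.keys)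
    (hk : 0 ≤ k.2 ∧ k.2 ≤ (blocks.length : Int)) :
    (nxt.insert k (nxt.getD k 0 + c)).keys.Nodup ∧
    KeysOk blocks (nxt.insert k (nxt.getD k 0 + c)).keys ∧
    WItems blocks rest ((nxt.insert k (nxt.getD k 0 + c)).items)
      = WItems blocks rest nxt.items + c * gRef rest k.1 (blocks.drop k.2.toNat) := by
  refine ⟨PySem.Dict.nodup_keys_insert _ _ _ hnd, ?_, bump_sum blocks rest nxt k c hnd⟩
  intro q hq
  rcases (PySem.Dict.mem_keys_insert _ _ _ _).1 hq with rfl | h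
  · exact hk
  · exact hok q h

lemma inner_one (blocks : List Int) (rest : List String) (p : (Int × Int) × Int)
    (hj : 0 ≤ p.1.2 ∧ p.1.2 ≤ (blocks.length : Int)) (ch : String)
    (nxt : PySem.Dict (Int × Int) Int) (hnd : nxt.keys.Nodup) (hok : KeysOk blocks nxt.keys) :
    (inF blocks p nxt ch).keys.Nodup ∧ KeysOk blocks (inF blocks p nxt ch).keys ∧
    WItems blocks rest (inF blocks p nxt ch).items
      = WItems blocks rest nxt.items + p.2 * contrib blocks rest p.1.1 p.1.2 ch := by
  by_cases hch : ch = "."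
  · by_cases hr : p.1.1 = 0
    · have he : inF blocks p nxt ch
          = nxt.insert (0, p.1.2) (nxt.getD (0, p.1.2) 0 + p.2) := by
        simp [inF, hch, hr]
      have hc : contrib blocks rest p.1.1 p.1.2 ch
          = gRef rest 0 (blocks.drop p.1.2.toNat) := by simp [contrib, hch, hr]
      rw [he, hc]
      exact insert_step blocks rest nxt (0, p.1.2) p.2 hnd hok (by exact hj)
    · by_cases hcond : p.1.2 < (blocks.length : Int) ∧
          PySem.List.pyGet? blocks p.1.2 = some p.1.1
      · have he : inF blocks p nxt ch
            = nxt.insert (0, p.1.2 + 1) (nxt.getD (0, p.1.2 + 1) 0 + p.2) := by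
          simp [inF, hch, hr, hcond]
        have hlt : p.1.2.toNat < blocks.length := by omega
        have hget : blocks[p.1.2.toNat] = p.1.1 := by
          have := hcond.2
          rw [PySem.List.pyGet?_of_nonneg blocks hj.1] at this
          simpa [List.getElem?_eq_getElem hlt] using this
        have hdrop : blocks.drop p.1.2.toNat
            = p.1.1 :: blocks.drop (p.1.2.toNat + 1) := by
          rw [List.drop_eq_getElem_cons hlt, hget]
        have hc : contrib blocks rest p.1.1 p.1.2 ch
            = gRef rest 0 (blocks.drop (p.1.2 + 1).toNat) := by
          have ht : (p.1.2 + 1).toNat = p.1.2.toNat + 1 := by omega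
          simp [contrib, hch, hr, hdrop, ht]
        rw [he, hc]
        exact insert_step blocks rest nxt (0, p.1.2 + 1) p.2 hnd hok (by constructor <;> omega)
      · have he : inF blocks p nxt ch = nxt := by simp [inF, hch, hr, hcond]
        have hc : contrib blocks rest p.1.1 p.1.2 ch = 0 := by
          by_cases hl : p.1.2 < (blocks.length : Int)
          · have hlt : p.1.2.toNat < blocks.length := by omega
            have hne : blocks[p.1.2.toNat] ≠ p.1.1 := by
              intro h
              exact hcond ⟨hl, by
                rw [PySem.List.pyGet?_of_nonneg blocks hj.1, List.getElem?_eq_getElem hlt, h]⟩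
            unfold contrib
            rw [List.drop_eq_getElem_cons hlt]
            simp [hch, hr, hne]
          · have hnil : blocks.drop p.1.2.toNat = [] := List.drop_eq_nil_iff.2 (by omega)
            unfold contrib
            rw [hnil]
            simp [hch, hr]
        rw [he, hc]
        exact ⟨hnd, hok, by ring⟩
  · by_cases hh : ch = "#"
    · have he : inF blocks p nxt ch
          = nxt.insert (p.1.1 + 1, p.1.2) (nxt.getD (p.1.1 + 1, p.1.2) 0 + p.2) := by
        simp [inF, hch, hh]
      have hc : contrib blocks rest p.1.1 p.1.2 ch
          = gRef rest (p.1.1 + 1) (blocks.drop p.1.2.toNat) := by simp [contrib, hch, hh]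
      rw [he, hc]
      exact insert_step blocks rest nxt (p.1.1 + 1, p.1.2) p.2 hnd hok (by exact hj)
    · have he : inF blocks p nxt ch
          = nxt.insert (p.1.1, p.1.2) (nxt.getD (p.1.1, p.1.2) 0 + p.2) := by
        simp [inF, hch, hh]
      have hc : contrib blocks rest p.1.1 p.1.2 ch
          = gRef rest p.1.1 (blocks.drop p.1.2.toNat) := by simp [contrib, hch, hh]
      rw [he, hc]
      exact insert_step blocks rest nxt (p.1.1, p.1.2) p.2 hnd hok (by exact hj)

lemma out_one (blocks : List Int) (s : String) (rest : List String) (p : (Int × Int) × Int)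
    (hj : 0 ≤ p.1.2 ∧ p.1.2 ≤ (blocks.length : Int))
    (nxt : PySem.Dict (Int × Int) Int) (hnd : nxt.keys.Nodup) (hok : KeysOk blocks nxt.keys) :
    (outF blocks s nxt p).keys.Nodup ∧ KeysOk blocks (outF blocks s nxt p).keys ∧
    WItems blocks rest (outF blocks s nxt p).items
      = WItems blocks rest nxt.items + p.2 * gRef (s :: rest) p.1.1 (blocks.drop p.1.2.toNat) := by
  rw [gRef_cons_contrib]
  by_cases hq : s = "?"
  · have he : outF blocks s nxt p = inF blocks p (inF blocks p nxt ".") "#" := by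
      simp [outF, hq]
    obtain ⟨h1, h2, h3⟩ := inner_one blocks rest p hj "." nxt hnd hok
    obtain ⟨h4, h5, h6⟩ := inner_one blocks rest p hj "#" _ h1 h2
    rw [he, h6, h3]
    refine ⟨h4, h5, by simp [hq]; ring⟩
  · have he : outF blocks s nxt p = inF blocks p nxt s := by simp [outF, hq]
    obtain ⟨h1, h2, h3⟩ := inner_one blocks rest p hj s nxt hnd hok
    rw [he, h3]
    exact ⟨h1, h2, by simp [hq]⟩

lemma step_fold (blocks : List Int) (s : String) (rest : List String) :
    ∀ (items : List ((Int × Int) × Int)) (nxt : PySem.Dict (Int × Int) Int),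
      nxt.keys.Nodup → KeysOk blocks nxt.keys →
      (∀ p ∈ items, 0 ≤ p.1.2 ∧ p.1.2 ≤ (blocks.length : Int)) →
      (items.foldl (outF blocks s) nxt).keys.Nodup ∧
      KeysOk blocks (items.foldl (outF blocks s) nxt).keys ∧
      WItems blocks rest (items.foldl (outF blocks s) nxt).items
        = WItems blocks rest nxt.items + WItems blocks (s :: rest) items := by
  intro items
  induction items with
  | nil => intro nxt hnd hok _; exact ⟨hnd, hok, by simp [WItems]⟩
  | cons p t ih =>
    intro nxt hnd hok hb
    obtain ⟨h1, h2, h3⟩ := out_one blocks s rest p (hb p (by simp)) nxt hnd hok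
    obtain ⟨h4, h5, h6⟩ := ih (outF blocks s nxt p) h1 h2 (fun q hq => hb q (by simp [hq]))
    refine ⟨h4, h5, ?_⟩
    rw [List.foldl_cons, h6, h3]
    unfold WItems
    simp only [List.map_cons, List.sum_cons]
    ring

lemma pvStep_all (blocks : List Int) (s : String) (rest : List String)
    (d : PySem.Dict (Int × Int) Int) (hnd : d.keys.Nodup) (hok : KeysOk blocks d.keys) :
    (pvStep blocks s d).keys.Nodup ∧ KeysOk blocks (pvStep blocks s d).keys ∧
    WItems blocks rest (pvStep blocks s d).items = WItems blocks (s :: rest) d.items := by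
  rw [pvStep_eq]
  have hb : ∀ p ∈ d.items, 0 ≤ p.1.2 ∧ p.1.2 ≤ (blocks.length : Int) := by
    intro p hp
    exact hok p.1 (PySem.Dict.mem_keys_of_mem_items _ hp)
  obtain ⟨h1, h2, h3⟩ := step_fold blocks s rest d.items PySem.Dict.empty
    (by simp [PySem.Dict.keys_empty]) (by intro q hq; simp [PySem.Dict.keys_empty] at hq) hb
  refine ⟨h1, h2, ?_⟩
  rw [h3]
  have : WItems blocks rest (PySem.Dict.empty (κ := Int × Int) (ν := Int)).items = 0 := by
    simp [WItems, PySem.Dict.empty]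
  rw [this, zero_add]

lemma config_fold (blocks : List Int) :
    ∀ (config : List String) (d : PySem.Dict (Int × Int) Int),
      d.keys.Nodup → KeysOk blocks d.keys →
      (config.foldl (fun states s => pvStep blocks s states) d).keys.Nodup ∧
      KeysOk blocks (config.foldl (fun states s => pvStep blocks s states) d).keys ∧
      WItems blocks [] (config.foldl (fun states s => pvStep blocks s states) d).items
        = WItems blocks config d.items := by
  intro config
  induction config with
  | nil => intro d hnd hok; exact ⟨hnd, hok, rfl⟩
  | cons s cs ih =>
    intro d hnd hok
    obtain ⟨h1, h2, h3⟩ := pvStep_all blocks s cs d hnd hok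
    obtain ⟨h4, h5, h6⟩ := ih (pvStep blocks s d) h1 h2
    exact ⟨h4, h5, by rw [List.foldl_cons, h6, h3]⟩

lemma end_val (blocks : List Int) (run j : Int)
    (h : 0 ≤ j ∧ j ≤ (blocks.length : Int)) :
    (if run = 0 then (if j = (blocks.length : Int) then (1 : Int) else 0)
     else if j = (blocks.length : Int) - 1 ∧ PySem.List.pyGet? blocks j = some run then 1 else 0)
      = gRef [] run (blocks.drop j.toNat) := by
  by_cases hr : run = 0
  · by_cases hj : j = (blocks.length : Int)
    · have : blocks.drop j.toNat = [] := List.drop_eq_nil_iff.2 (by omega)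
      simp [gRef, hr, hj, this]
    · have hne : blocks.drop j.toNat ≠ [] := by
        rw [ne_eq, List.drop_eq_nil_iff]; omega
      simp [gRef, hr, hj, hne]
  · by_cases hc : j = (blocks.length : Int) - 1 ∧ PySem.List.pyGet? blocks j = some run
    · have hlt : j.toNat < blocks.length := by omega
      have hget : blocks[j.toNat] = run := by
        have := hc.2
        rw [PySem.List.pyGet?_of_nonneg blocks h.1] at this
        simpa [List.getElem?_eq_getElem hlt] using this
      have hdrop : blocks.drop j.toNat = [run] := by
        rw [List.drop_eq_getElem_cons hlt, hget]
        have : blocks.drop (j.toNat + 1) = [] := List.drop_eq_nil_iff.2 (by omega)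
        rw [this]
      rw [if_neg hr, if_pos hc, hdrop]
      simp [gRef, hr]
    · have hne : blocks.drop j.toNat ≠ [run] := by
        intro hd
        apply hc
        have hlen : blocks.length - j.toNat = 1 := by
          have := congrArg List.length hd
          simpa [List.length_drop] using this
        have hlt : j.toNat < blocks.length := by omega
        have hget : blocks[j.toNat] = run := by
          have h3 := List.drop_eq_getElem_cons (l := blocks) hlt
          rw [hd] at h3
          injection h3 with ha _
          exact ha.symm
        refine ⟨by omega, ?_⟩
        rw [PySem.List.pyGet?_of_nonneg blocks h.1, List.getElem?_eq_getElem hlt, hget]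
      simp [gRef, hr, hc, hne]

lemma final_fold (blocks : List Int) :
    ∀ (items : List ((Int × Int) × Int)) (acc : Int),
      (∀ p ∈ items, 0 ≤ p.1.2 ∧ p.1.2 ≤ (blocks.length : Int)) →
      items.foldl (fun total p =>
        if p.1.1 = 0 then (if p.1.2 = (blocks.length : Int) then total + p.2 else total)
        else if p.1.2 = (blocks.length : Int) - 1 ∧
            PySem.List.pyGet? blocks p.1.2 = some p.1.1 then total + p.2
        else total) acc
        = acc + WItems blocks [] items := by
  intro items
  induction items with
  | nil => intro acc _; simp [WItems]
  | cons p t ih =>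
    intro acc hb
    rw [List.foldl_cons, ih _ (fun q hq => hb q (by simp [hq]))]
    have hstep : (if p.1.1 = 0 then (if p.1.2 = (blocks.length : Int) then acc + p.2 else acc)
        else if p.1.2 = (blocks.length : Int) - 1 ∧
            PySem.List.pyGet? blocks p.1.2 = some p.1.1 then acc + p.2
        else acc)
        = acc + p.2 * gRef [] p.1.1 (blocks.drop p.1.2.toNat) := by
      rw [← end_val blocks p.1.1 p.1.2 (hb p (by simp))]
      split_ifs <;> ring
    rw [hstep]
    unfold WItems
    simp only [List.map_cons, List.sum_cons]
    ring

lemma B_eq_gRef (config : List String) (blocks : List Int) :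
    count_possibilities_alt config blocks = gRef config 0 blocks := by
  unfold count_possibilities_alt
  have hinit : (PySem.Dict.empty.insert ((0 : Int), (0 : Int)) 1).items
      = [(((0 : Int), (0 : Int)), (1 : Int))] := by decide
  have hnd : (PySem.Dict.empty.insert ((0 : Int), (0 : Int)) (1 : Int)).keys.Nodup := by decide
  have hok : KeysOk blocks (PySem.Dict.empty.insert ((0 : Int), (0 : Int)) (1 : Int)).keys := by
    intro q hq
    have hk : (PySem.Dict.empty.insert ((0 : Int), (0 : Int)) (1 : Int)).keys
        = [((0 : Int), (0 : Int))] := by decide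
    rw [hk] at hq
    simp at hq
    rw [hq]
    exact ⟨le_refl 0, Int.natCast_nonneg _⟩
  obtain ⟨h1, h2, h3⟩ := config_fold blocks config _ hnd hok
  rw [final_fold blocks _ 0 (fun p hp => h2 p.1 (PySem.Dict.mem_keys_of_mem_items _ hp)), h3,
    hinit]
  unfold WItems
  simp [gRef]

-- ===== VERDICT (by name: the statement is the Claim_ definition above) =====
theorem count_possibilities_spec : Claim_equal_count_possibilities := by
  intro config blocks _
  unfold Spec_count_possibilities
  rw [A_eq_gRef, B_eq_gRef]
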